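-- pv_equiv track=rewrite | github.com/pypi-data/pypi-mirror-359 | packages/xbase-util/xbase_util-1.3.7.tar.gz/xbase_util-1.3.7/xbase_util/common_util.py | get_ua_duplicate_count
-- ===== SOURCE A (Python) =====
-- from collections import Counter
--
-- def get_ua_duplicate_count(all_packets):
--     headers = [item['req_header'] + item['res_header'] for item in all_packets]
--     ua_list = []
--     for header in headers:
--         lines = [item for item in header.split('\r\n') if 'User-Agent:' in item]
--         ua_list.extend(lines)
--     counter = Counter(ua_list)
--     pairs = sum(count // 2 for count in counter.values())
--     return pairs
-- ===== SOURCE B (Python) =====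
-- def get_ua_duplicate_count(all_packets):
--     pending = set()
--     pairs = 0
--     for item in all_packets:
--         for line in (item['req_header'] + item['res_header']).split('\r\n'):
--             if 'User-Agent:' in line:
--                 if line in pending:
--                     pending.remove(line)
--                     pairs += 1
--                 else:
--                     pending.add(line)
--     return pairs
-- ===== Notes on version B (the rewrite author's own statement) =====
-- stated objective: faster
-- what changed: Replaces A's multi-pass pipeline (build a headers list, collect all UA lines into one list, build a Counter, then a separate sum of count//2 over its values) with a single streaming pass that keeps a 'pending' set of as-yet-unpaired UA lines and counts a pair the moment a line repeats, allocating no intermediate lists or counter.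
import Mathlib
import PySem

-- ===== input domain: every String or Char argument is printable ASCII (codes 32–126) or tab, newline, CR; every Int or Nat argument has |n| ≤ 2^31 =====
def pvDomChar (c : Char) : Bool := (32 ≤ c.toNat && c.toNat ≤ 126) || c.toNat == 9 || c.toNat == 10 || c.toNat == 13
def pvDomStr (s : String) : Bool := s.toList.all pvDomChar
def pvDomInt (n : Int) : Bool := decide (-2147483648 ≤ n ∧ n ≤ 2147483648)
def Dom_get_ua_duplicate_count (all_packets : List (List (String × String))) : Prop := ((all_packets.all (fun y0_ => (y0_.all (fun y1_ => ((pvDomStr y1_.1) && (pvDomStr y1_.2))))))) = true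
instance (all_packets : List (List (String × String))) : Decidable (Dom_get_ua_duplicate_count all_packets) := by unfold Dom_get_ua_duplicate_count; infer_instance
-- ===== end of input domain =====

-- B replaces A's three passes (build all headers, collect all UA lines, Counter + sum of count//2)
-- by ONE pass that keeps a 'pending' set of unpaired UA lines and counts a pair the moment a line repeats.

-- Shared by both ports: both Pythons compute item['req_header'] + item['res_header'] and split it on '\r\n'.
-- String '+' is ported as PySem.Str.join "" [·, ·]; the dict lookups are getD, exact under Pre_ (both keys present).
def pvHeader (item : List (String × String)) : String :=
  PySem.Str.join "" [PySem.Dict.getD (PySem.Dict.ofList item) "req_header" "",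
                     PySem.Dict.getD (PySem.Dict.ofList item) "res_header" ""]

-- s.split('\r\n'): the separator is the nonempty literal '\r\n', so split? is never none; getD [] is exact.
def pvSplitCRLF (s : String) : List String :=
  (PySem.Str.split? s "\r\n").getD []

-- ===== PORT A =====
def get_ua_duplicate_count (all_packets : List (List (String × String))) : Int :=
  let headers := all_packets.map (fun item => pvHeader item)
  let ua_list := headers.foldl
    (fun acc header =>
      acc ++ (pvSplitCRLF header).filter (fun line => PySem.Str.isIn "User-Agent:" line)) []
  ((PySem.Dict.counter ua_list).values.map (fun count => PySem.Int.floordiv count 2)).sum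

-- ===== PORT B =====
-- the body of Source B's innermost 'if line in pending: … else: …'
-- (pending.remove on an element known to be present = PySem.Set.discard, exact here)
def pvToggle (st : PySem.Set String × Int) (line : String) : PySem.Set String × Int :=
  if PySem.Set.contains st.1 line then (PySem.Set.discard st.1 line, st.2 + 1)
  else (PySem.Set.add st.1 line, st.2)

def get_ua_duplicate_count_alt (all_packets : List (List (String × String))) : Int :=
  let st := all_packets.foldl
    (fun st item =>
      (pvSplitCRLF (pvHeader item)).foldl
        (fun st line => if PySem.Str.isIn "User-Agent:" line then pvToggle st line else st) st)
    ((PySem.Set.empty : PySem.Set String), (0 : Int))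
  st.2

-- ===== PRECONDITION & SPEC =====
-- Pre_ excludes exactly the packets on which A raises KeyError: a packet dict missing
-- the key 'req_header' or 'res_header' (B raises the same KeyError there).
def Pre_get_ua_duplicate_count (all_packets : List (List (String × String))) : Prop :=
  ∀ item ∈ all_packets, "req_header" ∈ item.map Prod.fst ∧ "res_header" ∈ item.map Prod.fst
instance (all_packets : List (List (String × String))) : Decidable (Pre_get_ua_duplicate_count all_packets) := by unfold Pre_get_ua_duplicate_count; infer_instance

def pvWitness_get_ua_duplicate_count : (List (List (String × String))) :=
  [[("req_header", "User-Agent: x\r\nHost: h"), ("res_header", "User-Agent: x")]]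

def Spec_get_ua_duplicate_count (all_packets : List (List (String × String))) (out : Int) : Prop := out = get_ua_duplicate_count_alt all_packets
instance (all_packets : List (List (String × String))) (out : Int) : Decidable (Spec_get_ua_duplicate_count all_packets out) := by unfold Spec_get_ua_duplicate_count; infer_instance

-- ===== CLAIM (what is proved, stated in full; the proofs are below) =====
def Claim_equal_get_ua_duplicate_count : Prop := ∀ (all_packets : List (List (String × String))), Dom_get_ua_duplicate_count all_packets → Pre_get_ua_duplicate_count all_packets → Spec_get_ua_duplicate_count all_packets (get_ua_duplicate_count all_packets)

-- ===== LEMMAS AND PROOFS =====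

-- the list of User-Agent lines contributed by one packet
def pvUA (item : List (String × String)) : List String :=
  (pvSplitCRLF (pvHeader item)).filter (fun line => PySem.Str.isIn "User-Agent:" line)

lemma toggle_spec (l : List String) : ∀ (s : List String) (p : Int), s.Nodup →
    (l.foldl pvToggle (s, p)).2
      = p + ∑ v ∈ (s ++ l).toFinset, (((l.count v + s.count v) / 2 : ℕ) : ℤ) := by
  induction l with
  | nil =>
    intro s p hs
    have hz : ∑ v ∈ (s ++ ([] : List String)).toFinset,
        (((List.count v [] + s.count v) / 2 : ℕ) : ℤ) = 0 := by
      apply Finset.sum_eq_zero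
      intro v hv
      rw [List.append_nil] at hv
      rw [List.count_nil, List.count_eq_one_of_mem hs (List.mem_toFinset.mp hv)]
      norm_num
    rw [List.foldl_nil, hz]
    ring
  | cons x rest ih =>
    intro s p hs
    rw [List.foldl_cons]
    by_cases hx : x ∈ s
    · have hc : pvToggle (s, p) x = (PySem.Set.discard s x, p + 1) := by
        simp [pvToggle, PySem.Set.contains, hx]
      rw [hc, ih (PySem.Set.discard s x) (p + 1)
        (show (PySem.Set.discard s x).Nodup from List.Nodup.filter _ hs)]
      have hFG : (s ++ x :: rest).toFinset
          = insert x ((PySem.Set.discard s x ++ rest).toFinset) := by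
        ext v
        by_cases hvx : v = x <;>
          simp [PySem.Set.discard, hvx, hx]
      have hxF : x ∈ (s ++ x :: rest).toFinset := by simp
      have hsum := (Finset.add_sum_erase (s ++ x :: rest).toFinset
        (fun v => (((List.count v (x :: rest) + s.count v) / 2 : ℕ) : ℤ)) hxF).symm
      have herase : ((s ++ x :: rest).toFinset).erase x
          = ((PySem.Set.discard s x ++ rest).toFinset).erase x := by
        rw [hFG, Finset.erase_insert_eq_erase]
      have hterm : ∀ v ∈ ((PySem.Set.discard s x ++ rest).toFinset).erase x,
          (((List.count v (x :: rest) + s.count v) / 2 : ℕ) : ℤ)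
            = (((List.count v rest + List.count v (PySem.Set.discard s x)) / 2 : ℕ) : ℤ) := by
        intro v hv
        have hvx : v ≠ x := (Finset.mem_erase.mp hv).1
        have h1 : List.count v (x :: rest) = List.count v rest := by
          simp [Ne.symm hvx]
        have h2 : List.count v (PySem.Set.discard s x) = List.count v s := by
          apply List.count_filter
          simp [hvx]
        rw [h1, h2]
      have hfx : List.count x (x :: rest) + s.count x = List.count x rest + 2 := by
        rw [List.count_cons_self, List.count_eq_one_of_mem hs hx]
      have hgx0 : List.count x (PySem.Set.discard s x) = 0 := by
        rw [List.count_eq_zero]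
        simp [PySem.Set.discard, List.mem_filter]
      by_cases hxr : x ∈ rest
      · have hxG : x ∈ (PySem.Set.discard s x ++ rest).toFinset := by simp [hxr]
        have hsumG := (Finset.add_sum_erase (PySem.Set.discard s x ++ rest).toFinset
          (fun v => (((List.count v rest + List.count v (PySem.Set.discard s x)) / 2 : ℕ) : ℤ)) hxG).symm
        rw [hsum, hsumG, herase, Finset.sum_congr rfl hterm, hfx, hgx0]
        have : ((List.count x rest + 2) / 2 : ℕ) = (List.count x rest + 0) / 2 + 1 := by omega
        rw [this]
        push_cast
        ring
      · have hxG : x ∉ (PySem.Set.discard s x ++ rest).toFinset := by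
          simp [PySem.Set.discard, hxr]
        rw [hsum, herase, Finset.sum_congr rfl hterm, Finset.erase_eq_self.mpr hxG, hfx]
        have hr0 : List.count x rest = 0 := List.count_eq_zero.mpr hxr
        rw [hr0]
        norm_num
        ring
    · have hc : pvToggle (s, p) x = (s ++ [x], p) := by
        simp [pvToggle, PySem.Set.contains, PySem.Set.add, hx]
      have hnd : (s ++ [x]).Nodup := by
        simp only [List.nodup_append]
        refine ⟨hs, List.nodup_singleton x, fun a ha b hb => ?_⟩
        simp only [List.mem_singleton] at hb
        subst hb
        exact fun h => hx (h ▸ ha)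
      rw [hc, ih _ _ hnd]
      have hset : (s ++ [x] ++ rest).toFinset = (s ++ x :: rest).toFinset := by
        ext v; simp
      rw [hset]
      congr 1
      apply Finset.sum_congr rfl
      intro v hv
      have : List.count v rest + List.count v (s ++ [x])
          = List.count v (x :: rest) + s.count v := by
        by_cases hvx : v = x <;>
          simp [List.count_append, List.count_cons, hvx] <;> omega
      rw [this]

lemma a_side (L : List String) :
    ((PySem.Dict.counter L).values.map (fun count => PySem.Int.floordiv count 2)).sum
      = ∑ v ∈ L.toFinset, ((L.count v / 2 : ℕ) : ℤ) := by
  have hfd : ∀ m : ℕ, PySem.Int.floordiv (m : ℤ) 2 = ((m / 2 : ℕ) : ℤ) := fun m => by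
    exact_mod_cast PySem.Int.floordiv_natCast m 2
  simp only [PySem.Dict.values, PySem.Dict.items_counter, List.map_map]
  have hmap : (((fun count => PySem.Int.floordiv count 2) ∘ (fun x => x.2) ∘
      fun k => (k, ((List.count k L : ℕ) : ℤ))) : String → ℤ)
      = fun v => ((List.count v L / 2 : ℕ) : ℤ) := by
    funext v
    simp only [Function.comp]
    exact hfd (List.count v L)
  rw [hmap, ← List.sum_toFinset _ (PySem.Set.nodup_ofList L)]
  congr 1
  ext v
  simp [PySem.Set.mem_ofList]

-- ===== VERDICT (by name: the statement is the Claim_ definition above) =====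
theorem get_ua_duplicate_count_spec : Claim_equal_get_ua_duplicate_count := by
  intro aps _ _
  unfold Spec_get_ua_duplicate_count get_ua_duplicate_count get_ua_duplicate_count_alt
  simp only [List.foldl_map]
  have hA : (aps.foldl
      (fun acc item => acc ++ (pvSplitCRLF (pvHeader item)).filter
        (fun line => PySem.Str.isIn "User-Agent:" line)) []) = aps.flatMap pvUA := by
    rw [PySem.List.foldl_append_eq_flatMap, List.nil_append]
    rfl
  have hB : (aps.foldl
      (fun st item =>
        (pvSplitCRLF (pvHeader item)).foldl
          (fun st line => if PySem.Str.isIn "User-Agent:" line then pvToggle st line else st) st)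
      ((PySem.Set.empty : PySem.Set String), (0 : Int)))
      = ((aps.flatMap pvUA).foldl pvToggle (([] : List String), (0 : Int))) := by
    rw [List.foldl_flatMap]
    have hf : ∀ (st : PySem.Set String × Int) (item : List (String × String)),
        (pvSplitCRLF (pvHeader item)).foldl
          (fun st line => if PySem.Str.isIn "User-Agent:" line then pvToggle st line else st) st
        = (pvUA item).foldl pvToggle st := by
      intro st item; rw [pvUA, List.foldl_filter]
    simp only [hf]
    rfl
  rw [hA, hB, a_side, toggle_spec _ _ _ List.nodup_nil]
  simp
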